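-- pv_equiv track=rewrite | github.com/t-yang-only/python- | 装逼代码.py | split_points_into_lines
-- ===== SOURCE A (Python) =====
-- def split_points_into_lines(points):
--     if not points:
--         return [points]
--     ys = sorted(set(p[1] for p in points))
--     clusters, cur, prev = [], [], None
--     for y in ys:
--         if prev is None or y == prev + 1:
--             cur.append(y)
--         else:
--             clusters.append(cur); cur = [y]
--         prev = y
--     if cur: clusters.append(cur)
--     if len(clusters) == 2:
--         top_rows = set(clusters[0]); bottom_rows = set(clusters[1])
--         top_points = [p for p in points if p[1] in top_rows]
--         bottom_points = [p for p in points if p[1] in bottom_rows]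
--         return [top_points, bottom_points]
--     return [points]
-- ===== SOURCE B (Python) =====
-- def split_points_into_lines(points):
--     if not points:
--         return [points]
--     rows = set(p[1] for p in points)
--     # a row y starts a cluster of consecutive rows iff y-1 is not itself a row
--     starts = {y for y in rows if y - 1 not in rows}
--     if len(starts) == 2:
--         cut = max(starts)  # first row of the upper cluster
--         return [[p for p in points if p[1] < cut],
--                 [p for p in points if p[1] >= cut]]
--     return [points]
-- ===== Notes on version B (the rewrite author's own statement) =====
-- stated objective: alternative
-- what changed: B never sorts and never builds clusters: it counts cluster starts directly with set membership (a row y starts a cluster iff y-1 is not a row), and when there are exactly two starts it partitions the points by comparing against the larger start, the first row of the upper cluster.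
import Mathlib
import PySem

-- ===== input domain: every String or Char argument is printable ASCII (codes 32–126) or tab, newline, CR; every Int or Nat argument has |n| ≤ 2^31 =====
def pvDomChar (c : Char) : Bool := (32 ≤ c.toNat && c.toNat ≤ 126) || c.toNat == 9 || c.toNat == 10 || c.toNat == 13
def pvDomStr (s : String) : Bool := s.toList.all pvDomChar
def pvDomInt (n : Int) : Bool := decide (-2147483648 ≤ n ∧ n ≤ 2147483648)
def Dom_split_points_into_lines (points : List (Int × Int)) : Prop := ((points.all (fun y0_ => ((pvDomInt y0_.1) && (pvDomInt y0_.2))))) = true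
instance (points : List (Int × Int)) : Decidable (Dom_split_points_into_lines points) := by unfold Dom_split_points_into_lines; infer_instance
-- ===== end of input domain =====

-- B never sorts and never builds clusters: it counts cluster starts with set membership
-- (a row y starts a cluster iff y-1 is not a row) and, with exactly two starts, partitions
-- the points by comparison with the larger start (objective: alternative).

-- ===== PORT A =====
-- the body of A's 'for y in ys' loop, on state (clusters, cur, prev)
def pvStepA (s : List (List Int) × List Int × Option Int) (y : Int) :
    List (List Int) × List Int × Option Int :=
  match s.2.2 with
  | none => (s.1, s.2.1 ++ [y], some y)
  | some prev =>
      if y = prev + 1 then (s.1, s.2.1 ++ [y], some y)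
      else (s.1 ++ [s.2.1], [y], some y)

def split_points_into_lines (points : List (Int × Int)) : List (List (Int × Int)) :=
  if points = [] then [points] else
  let ys := PySem.List.sorted (PySem.Set.ofList (points.map (fun p => p.2))) (fun y => y) false
  let st := ys.foldl pvStepA ([], [], none)
  let clusters := if st.2.1 ≠ [] then st.1 ++ [st.2.1] else st.1
  if clusters.length = 2 then
    let top_rows := PySem.Set.ofList (clusters.getD 0 [])
    let bottom_rows := PySem.Set.ofList (clusters.getD 1 [])
    [points.filter (fun p => PySem.Set.contains top_rows p.2),
     points.filter (fun p => PySem.Set.contains bottom_rows p.2)]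
  else [points]

-- ===== PORT B =====
def split_points_into_lines_alt (points : List (Int × Int)) : List (List (Int × Int)) :=
  if points = [] then [points] else
  let rows : PySem.Set Int := PySem.Set.ofList (points.map (fun p => p.2))
  let starts : PySem.Set Int :=
    PySem.Set.ofList (rows.filter (fun y => !(PySem.Set.contains rows (y - 1))))
  if starts.length = 2 then
    let cut := (PySem.List.max? starts (fun y => y)).getD 0
    [points.filter (fun p => p.2 < cut), points.filter (fun p => cut ≤ p.2)]
  else [points]

-- ===== PRECONDITION & SPEC =====
def Spec_split_points_into_lines (points : List (Int × Int)) (out : List (List (Int × Int))) : Prop := out = split_points_into_lines_alt points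
instance (points : List (Int × Int)) (out : List (List (Int × Int))) : Decidable (Spec_split_points_into_lines points out) := by unfold Spec_split_points_into_lines; infer_instance

-- ===== CLAIM (what is proved, stated in full; the proofs are below) =====
def Claim_equal_split_points_into_lines : Prop := ∀ (points : List (Int × Int)), Dom_split_points_into_lines points → Spec_split_points_into_lines points (split_points_into_lines points)

-- ===== LEMMAS AND PROOFS =====

-- the runs of consecutive integers in y :: l, as A's loop builds them
def pvConsHead (y : Int) : List (List Int) → List (List Int)
  | [] => [[y]]
  | r :: rs => (y :: r) :: rs

def pvRuns (y : Int) : List Int → List (List Int)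
  | [] => [[y]]
  | z :: t => if z = y + 1 then pvConsHead y (pvRuns z t) else [y] :: pvRuns z t

-- the run starts after y in y :: l (so the run starts of y :: l are y :: pvNexts y l)
def pvNexts (y : Int) : List Int → List Int
  | [] => []
  | z :: t => if z = y + 1 then pvNexts z t else z :: pvNexts z t

def pvMapHead (g : List Int → List Int) : List (List Int) → List (List Int)
  | [] => []
  | r :: rs => g r :: rs

def pvFinish (s : List (List Int) × List Int × Option Int) : List (List Int) :=
  if s.2.1 ≠ [] then s.1 ++ [s.2.1] else s.1

theorem pvConsHead_ne_nil (y : Int) (rs : List (List Int)) : pvConsHead y rs ≠ [] := by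
  cases rs <;> simp [pvConsHead]

theorem pvRuns_ne_nil (y : Int) (l : List Int) : pvRuns y l ≠ [] := by
  induction l generalizing y with
  | nil => simp [pvRuns]
  | cons z t ih =>
    simp only [pvRuns]
    split
    · exact pvConsHead_ne_nil _ _
    · simp

theorem pvRuns_forall_ne_nil (y : Int) (l : List Int) : ∀ r ∈ pvRuns y l, r ≠ [] := by
  induction l generalizing y with
  | nil => simp [pvRuns]
  | cons z t ih =>
    simp only [pvRuns]
    split
    · intro r hr
      cases hE : pvRuns z t with
      | nil => exact absurd hE (pvRuns_ne_nil z t)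
      | cons r0 rs =>
        rw [hE] at hr
        simp only [pvConsHead] at hr
        rcases List.mem_cons.mp hr with h | h
        · subst h; simp
        · exact ih z r (by rw [hE]; exact List.mem_cons_of_mem _ h)
    · intro r hr
      rcases List.mem_cons.mp hr with h | h
      · subst h; simp
      · exact ih z r h

theorem pvRuns_heads (l : List Int) : ∀ y : Int,
    (pvRuns y l).map (fun r => r.headD 0) = y :: pvNexts y l := by
  induction l with
  | nil => intro y; simp [pvRuns, pvNexts]
  | cons z t ih =>
    intro y
    simp only [pvRuns, pvNexts]
    by_cases hz : z = y + 1
    · rw [if_pos hz, if_pos hz]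
      cases hE : pvRuns z t with
      | nil => exact absurd hE (pvRuns_ne_nil z t)
      | cons r rs =>
        have h1 := ih z; rw [hE] at h1
        simp only [List.map_cons] at h1
        simp only [pvConsHead, List.map_cons, List.headD_cons]
        exact congrArg (y :: ·) (List.cons.injEq _ _ _ _ ▸ h1).2
    · rw [if_neg hz, if_neg hz]
      simpa using congrArg (y :: ·) (ih z)

theorem pvRuns_flatten (y : Int) (l : List Int) : (pvRuns y l).flatten = y :: l := by
  induction l generalizing y with
  | nil => simp [pvRuns]
  | cons z t ih =>
    simp only [pvRuns]
    split
    · have hR := pvRuns_ne_nil z t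
      cases hE : pvRuns z t with
      | nil => exact absurd hE hR
      | cons r rs =>
        have := ih z; rw [hE] at this
        simp only [pvConsHead, List.flatten_cons] at this ⊢
        simp [← this]
    · simp [ih z]

theorem pvMapHead_nil_append (R : List (List Int)) :
    pvMapHead (fun r => [] ++ r) R = R := by
  cases R <;> simp [pvMapHead]

theorem pvStepA_some (cs : List (List Int)) (cur : List Int) (p y : Int) :
    pvStepA (cs, cur, some p) y =
      if y = p + 1 then (cs, cur ++ [y], some y) else (cs ++ [cur], [y], some y) := rfl

theorem pvFold_char (l : List Int) : ∀ (cs : List (List Int)) (cur : List Int) (y : Int),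
    pvFinish (l.foldl pvStepA (cs, cur ++ [y], some y)) =
    cs ++ pvMapHead (fun r => cur ++ r) (pvRuns y l) := by
  induction l with
  | nil => intro cs cur y; simp [pvFinish, pvRuns, pvMapHead]
  | cons z t ih =>
    intro cs cur y
    rw [List.foldl_cons, pvStepA_some]
    by_cases hz : z = y + 1
    · rw [if_pos hz]
      have h1 := ih cs (cur ++ [y]) z
      rw [h1]
      have hR := pvRuns_ne_nil z t
      simp only [pvRuns, if_pos hz]
      cases hE : pvRuns z t with
      | nil => exact absurd hE hR
      | cons r rs => simp [pvConsHead, pvMapHead]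
    · rw [if_neg hz]
      have h1 := ih (cs ++ [cur ++ [y]]) [] z
      rw [show ([] : List Int) ++ [z] = [z] by simp] at h1
      rw [h1, pvMapHead_nil_append]
      simp [pvRuns, hz, pvMapHead]

-- the start filter on the sorted distinct row list is y :: pvNexts y l
theorem pvStarts_sorted (l : List Int) : ∀ y : Int, (y :: l).Pairwise (· < ·) →
    ∀ P : Int → Bool, (∀ v, P v = true ↔ (v - 1) ∉ (y :: l)) →
    (y :: l).filter P = y :: pvNexts y l := by
  induction l with
  | nil =>
    intro y _ P hP
    have : P y = true := (hP y).mpr (by intro h; rw [List.mem_singleton] at h; omega)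
    simp [List.filter, this, pvNexts]
  | cons z t ih =>
    intro y hp P hP
    have hyl : ∀ v ∈ z :: t, y < v := (List.pairwise_cons.mp hp).1
    have hzt : ∀ v ∈ t, z < v := (List.pairwise_cons.mp (List.pairwise_cons.mp hp).2).1
    -- P' : the same start test relative to the tail z :: t
    have hPy : P y = true := by
      refine (hP y).mpr ?_
      intro hmem
      rcases List.mem_cons.mp hmem with h | h
      · omega
      · have := hyl _ h; omega
    have hPz : P z = true ↔ z ≠ y + 1 := by
      rw [hP z]
      constructor
      · intro h hzy; exact h (by simp; omega)
      · intro h hmem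
        rcases List.mem_cons.mp hmem with hc | hc
        · omega
        · rcases List.mem_cons.mp hc with hc | hc
          · omega
          · have := hzt _ hc; omega
    have htail : ∀ v ∈ t, (P v = true ↔ (v - 1) ∉ (z :: t)) := by
      intro v hv
      rw [hP v]
      have hvz := hzt v hv
      have hvy := hyl v (List.mem_cons_of_mem _ hv)
      have hyz := hyl z List.mem_cons_self
      constructor
      · intro h hmem; exact h (List.mem_cons_of_mem _ hmem)
      · intro h hmem
        rcases List.mem_cons.mp hmem with hc | hc
        · omega
        · exact h hc
    -- rewrite the filter of t against the tail predicate, then use ih on z :: t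
    have hPt : ∀ Q : Int → Bool, (∀ v, Q v = true ↔ (v - 1) ∉ (z :: t)) →
        t.filter P = t.filter Q := by
      intro Q hQ
      apply List.filter_congr
      intro v hv
      have h1 := htail v hv
      have h2 := hQ v
      by_cases h : (v - 1) ∈ (z :: t)
      · have : P v ≠ true := fun hc => (h1.mp hc) h
        have : P v = false := by revert this; cases P v <;> simp
        have h2' : Q v ≠ true := fun hc => (h2.mp hc) h
        have : Q v = false := by revert h2'; cases Q v <;> simp
        simp_all
      · simp [h1.mpr h, h2.mpr h]
    -- instantiate Q with the decidable membership predicate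
    have hQspec : ∀ v : Int, (decide ((v - 1) ∉ (z :: t))) = true ↔ (v - 1) ∉ (z :: t) := by
      intro v; simp
    have ihz := ih z (List.pairwise_cons.mp hp).2 (fun v => decide ((v - 1) ∉ (z :: t))) hQspec
    have ihz' : t.filter (fun v => decide ((v - 1) ∉ (z :: t))) = pvNexts z t := by
      have hQz : (decide ((z - 1) ∉ (z :: t))) = true := by
        simp only [decide_eq_true_iff]
        intro hmem
        rcases List.mem_cons.mp hmem with hc | hc
        · omega
        · have := hzt _ hc; omega
      rw [List.filter_cons, if_pos hQz] at ihz
      exact (List.cons.injEq _ _ _ _ ▸ ihz).2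
    rw [List.filter_cons, if_pos hPy, List.filter_cons]
    rw [hPt _ hQspec, ihz']
    simp only [pvNexts]
    by_cases hz : z = y + 1
    · rw [if_pos hz]
      have : P z ≠ true := fun hc => (hPz.mp hc) hz
      have hPzf : P z = false := by revert this; cases P z <;> simp
      rw [hPzf]; simp
    · rw [if_neg hz, if_pos (hPz.mpr hz)]

-- membership of every point's y in ys
theorem pvYs_mem (points : List (Int × Int)) (p : Int × Int) (hp : p ∈ points) :
    p.2 ∈ PySem.List.sorted (PySem.Set.ofList (points.map (fun p => p.2))) (fun y => y) false := by
  rw [PySem.List.mem_sorted, PySem.Set.mem_ofList]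
  exact List.mem_map_of_mem hp

theorem pvYs_sorted_lt (points : List (Int × Int)) :
    (PySem.List.sorted (PySem.Set.ofList (points.map (fun p => p.2))) (fun y => y) false).Pairwise (· < ·) :=
  PySem.List.sorted_ofList_pairwise_lt _

-- ===== VERDICT (by name: the statement is the Claim_ definition above) =====
theorem split_points_into_lines_spec : Claim_equal_split_points_into_lines := by
  intro points _hdom
  unfold Spec_split_points_into_lines split_points_into_lines split_points_into_lines_alt
  by_cases hnil : points = []
  · simp [hnil]
  · rw [if_neg hnil, if_neg hnil]
    have hys : PySem.List.sorted (PySem.Set.ofList (points.map (fun p => p.2))) (fun y => y) false ≠ [] := by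
      intro h0
      obtain ⟨p, ps, rfl⟩ := List.exists_cons_of_ne_nil hnil
      have := pvYs_mem (p :: ps) p List.mem_cons_self
      rw [h0] at this
      exact absurd this (List.not_mem_nil)
    obtain ⟨y, l, hE⟩ := List.exists_cons_of_ne_nil hys
    have hlt : (y :: l).Pairwise (· < ·) := hE ▸ pvYs_sorted_lt points
    have hperm : (y :: l).Perm (PySem.Set.ofList (points.map (fun p => p.2))) :=
      hE ▸ PySem.List.sorted_perm _ _ _
    rw [hE]
    -- A's loop result, through pvFinish / pvFold_char
    have hclusters : pvFinish ((y :: l).foldl pvStepA ([], [], none)) = pvRuns y l := by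
      rw [List.foldl_cons]
      have h0 : pvStepA ([], [], none) y = ([], [] ++ [y], some y) := rfl
      rw [h0, pvFold_char l [] [] y, pvMapHead_nil_append]
      simp
    simp only []
    rw [show (if ((y :: l).foldl pvStepA ([], [], none)).2.1 ≠ [] then
          ((y :: l).foldl pvStepA ([], [], none)).1 ++ [((y :: l).foldl pvStepA ([], [], none)).2.1]
        else ((y :: l).foldl pvStepA ([], [], none)).1) = pvFinish ((y :: l).foldl pvStepA ([], [], none))
        from rfl,
      hclusters]
    -- B's start set is a permutation of y :: pvNexts y l
    have hPspec : ∀ v : Int,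
        (!(PySem.Set.contains (PySem.Set.ofList (points.map (fun p => p.2))) (v - 1))) = true ↔
        (v - 1) ∉ (y :: l) := by
      intro v
      rw [Bool.not_eq_eq_eq_not, Bool.not_true, ← Bool.not_eq_true,
        PySem.Set.contains_iff]
      exact (not_congr hperm.mem_iff).symm
    have hfilYs : (y :: l).filter
        (fun v => !(PySem.Set.contains (PySem.Set.ofList (points.map (fun p => p.2))) (v - 1)))
        = y :: pvNexts y l := pvStarts_sorted l y hlt _ hPspec
    have hrowsNodup : (PySem.Set.ofList (points.map (fun p => p.2))).Nodup :=
      PySem.Set.nodup_ofList _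
    have hsetself : PySem.Set.ofList ((PySem.Set.ofList (points.map (fun p => p.2))).filter
          (fun v => !(PySem.Set.contains (PySem.Set.ofList (points.map (fun p => p.2))) (v - 1))))
        = (PySem.Set.ofList (points.map (fun p => p.2))).filter
          (fun v => !(PySem.Set.contains (PySem.Set.ofList (points.map (fun p => p.2))) (v - 1))) :=
      PySem.Set.ofList_eq_self_of_nodup _ (hrowsNodup.filter _)
    have hpermS : ((PySem.Set.ofList (points.map (fun p => p.2))).filter
          (fun v => !(PySem.Set.contains (PySem.Set.ofList (points.map (fun p => p.2))) (v - 1)))).Perm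
        (y :: pvNexts y l) := hfilYs ▸ (hperm.filter _).symm
    rw [hsetself]
    have hlenS : ((PySem.Set.ofList (points.map (fun p => p.2))).filter
          (fun v => !(PySem.Set.contains (PySem.Set.ofList (points.map (fun p => p.2))) (v - 1)))).length
        = (pvNexts y l).length + 1 := by
      rw [hpermS.length_eq]; simp
    have hlenA : (pvRuns y l).length = (pvNexts y l).length + 1 := by
      have := congrArg List.length (pvRuns_heads l y)
      simpa using this
    rcases hnx : pvNexts y l with _ | ⟨s, _ | ⟨s2, r⟩⟩
    · -- no further start: one cluster, both sides take the default branch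
      rw [hnx] at hlenS hlenA
      rw [hlenS, hlenA]
      simp
    · -- exactly two starts y and s: two clusters
      rw [hnx] at hlenS hlenA hpermS
      obtain ⟨c0, c1, hR⟩ : ∃ c0 c1, pvRuns y l = [c0, c1] := by
        rcases hRl : pvRuns y l with _ | ⟨a, _ | ⟨b, _ | _⟩⟩ <;>
          simp [hRl] at hlenA ⊢
      have hheads := pvRuns_heads l y
      rw [hR, hnx] at hheads
      simp only [List.map_cons, List.map_nil] at hheads
      have hc1ne : c1 ≠ [] := pvRuns_forall_ne_nil y l c1 (by rw [hR]; simp)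
      have hc0ne : c0 ≠ [] := pvRuns_forall_ne_nil y l c0 (by rw [hR]; simp)
      obtain ⟨s', c1t, rfl⟩ := List.exists_cons_of_ne_nil hc1ne
      obtain ⟨y', c0t, rfl⟩ := List.exists_cons_of_ne_nil hc0ne
      have hs' : s = s' := by
        have := congrArg (fun xs => xs.getD 1 0) hheads
        simpa using this.symm
      have hy' : y = y' := by
        have := congrArg (fun xs => xs.getD 0 0) hheads
        simpa using this.symm
      subst hs'; subst hy'
      have hF : (y :: c0t) ++ (s :: c1t) = y :: l := by
        have := pvRuns_flatten y l
        rw [hR] at this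
        simpa using this
      have hpw : ((y :: c0t) ++ (s :: c1t)).Pairwise (· < ·) := hF ▸ hlt
      have hcross : ∀ a ∈ y :: c0t, ∀ b ∈ s :: c1t, a < b :=
        (List.pairwise_append.mp hpw).2.2
      have hc1lo : ∀ b ∈ s :: c1t, s ≤ b := by
        intro b hb
        rcases List.mem_cons.mp hb with h | h
        · omega
        · have := (List.pairwise_cons.mp (List.pairwise_append.mp hpw).2.1).1 b h
          omega
      have hys_lt_s : y < s := hcross y List.mem_cons_self s List.mem_cons_self
      -- the max of the two starts is s
      have hcut : (PySem.List.max? ((PySem.Set.ofList (points.map (fun p => p.2))).filter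
            (fun v => !(PySem.Set.contains (PySem.Set.ofList (points.map (fun p => p.2))) (v - 1))))
            (fun y => y)).getD 0 = s := by
        rcases hm : PySem.List.max? ((PySem.Set.ofList (points.map (fun p => p.2))).filter
            (fun v => !(PySem.Set.contains (PySem.Set.ofList (points.map (fun p => p.2))) (v - 1))))
            (fun y => y) with _ | m
        · rw [PySem.List.max?_eq_none_iff] at hm
          rw [hm] at hpermS
          exact absurd hpermS.length_eq (by simp)
        · have hmem := PySem.List.max?_mem hm
          have hmax := PySem.List.max?_isMax hm
          have hsmem : s ∈ ((PySem.Set.ofList (points.map (fun p => p.2))).filter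
              (fun v => !(PySem.Set.contains (PySem.Set.ofList (points.map (fun p => p.2))) (v - 1)))) :=
            hpermS.mem_iff.mpr (by simp)
          have hm2 : m = y ∨ m = s := by
            have := hpermS.mem_iff.mp hmem
            simpa using this
          have hsle : s ≤ m := hmax s hsmem
          have : m = s := by rcases hm2 with h | h <;> omega
          simp [this]
      rw [hR, hcut]
      simp only [List.length_cons, List.length_nil, List.getD,
        List.getElem?_cons_zero, List.getElem?_cons_succ, Option.getD_some]
      have hmem : ∀ p ∈ points, p.2 ∈ (y :: c0t) ++ (s :: c1t) := by
        intro p hp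
        rw [hF, ← hE]
        exact pvYs_mem points p hp
      have h0 : points.filter (fun p => PySem.Set.contains (PySem.Set.ofList (y :: c0t)) p.2)
          = points.filter (fun p => decide (p.2 < s)) := by
        apply List.filter_congr
        intro p hp
        have hcm : PySem.Set.contains (PySem.Set.ofList (y :: c0t)) p.2 = true ↔ p.2 ∈ y :: c0t := by
          rw [PySem.Set.contains_iff, PySem.Set.mem_ofList]
        rcases List.mem_append.mp (hmem p hp) with hin | hin
        · have hlt' : p.2 < s := hcross p.2 hin s List.mem_cons_self
          rw [hcm.mpr hin, decide_eq_true hlt']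
        · have hge := hc1lo p.2 hin
          have hnot : p.2 ∉ y :: c0t := fun hc =>
            absurd (hcross p.2 hc s List.mem_cons_self) (by omega)
          have hfalse : PySem.Set.contains (PySem.Set.ofList (y :: c0t)) p.2 = false :=
            Bool.eq_false_iff.mpr (fun hc => hnot (hcm.mp hc))
          rw [hfalse, decide_eq_false (by omega : ¬ p.2 < s)]
      have h1 : points.filter (fun p => PySem.Set.contains (PySem.Set.ofList (s :: c1t)) p.2)
          = points.filter (fun p => decide (s ≤ p.2)) := by
        apply List.filter_congr
        intro p hp
        have hcm : PySem.Set.contains (PySem.Set.ofList (s :: c1t)) p.2 = true ↔ p.2 ∈ s :: c1t := by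
          rw [PySem.Set.contains_iff, PySem.Set.mem_ofList]
        rcases List.mem_append.mp (hmem p hp) with hin | hin
        · have hlt' : p.2 < s := hcross p.2 hin s List.mem_cons_self
          have hnot : p.2 ∉ s :: c1t := fun hc => absurd (hc1lo p.2 hc) (by omega)
          have hfalse : PySem.Set.contains (PySem.Set.ofList (s :: c1t)) p.2 = false :=
            Bool.eq_false_iff.mpr (fun hc => hnot (hcm.mp hc))
          rw [hfalse, decide_eq_false (by omega : ¬ s ≤ p.2)]
        · have hge := hc1lo p.2 hin
          rw [hcm.mpr hin, decide_eq_true hge]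
      rw [if_pos (by simp), if_pos (by rw [hlenS]; rfl), h0, h1]
    · -- three or more starts: three or more clusters, both sides default
      rw [hnx] at hlenS hlenA
      rw [hlenS, hlenA]
      simp
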